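-- pv_equiv track=rewrite | github.com/fesuard/Hackerrank | easy/Anagram.py | anagram1
-- ===== SOURCE A (Python) =====
-- def anagram1(s):
--     n = len(s)
--
--     if n % 2 == 0:
--         res = 0
--         s1 = s[:n//2]
--         s2 = s[n//2:]
--         hm1 = {}
--         hm2 = {}
--
--         for i in range(len(s1)):
--             hm1[s1[i]] = hm1.get(s1[i], 0) + 1
--             hm2[s2[i]] = hm2.get(s2[i], 0) + 1
--
--         for key in hm1.keys():
--             if key in hm2:
--                 if hm1[key] > hm2[key]:
--                     res += hm1[key] - hm2[key]
--             else:
--                 res += hm1[key]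
--
--         return res
--
--     return -1
-- ===== SOURCE B (Python) =====
-- def anagram1(s):
--     n = len(s)
--     if n % 2 != 0:
--         return -1
--     half = n // 2
--     c1 = {}
--     for ch in s[:half]:
--         c1[ch] = c1.get(ch, 0) + 1
--     matched = 0
--     for ch in s[half:]:
--         if c1.get(ch, 0) > 0:
--             c1[ch] = c1[ch] - 1
--             matched += 1
--     return half - matched
-- ===== Notes on version B (the rewrite author's own statement) =====
-- stated objective: alternative
-- what changed: Instead of building two frequency maps and summing positive surpluses of the first half over the second, B builds one counter for the first half and greedily matches each second-half character against it, returning n//2 minus the number of matches.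
import Mathlib
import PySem

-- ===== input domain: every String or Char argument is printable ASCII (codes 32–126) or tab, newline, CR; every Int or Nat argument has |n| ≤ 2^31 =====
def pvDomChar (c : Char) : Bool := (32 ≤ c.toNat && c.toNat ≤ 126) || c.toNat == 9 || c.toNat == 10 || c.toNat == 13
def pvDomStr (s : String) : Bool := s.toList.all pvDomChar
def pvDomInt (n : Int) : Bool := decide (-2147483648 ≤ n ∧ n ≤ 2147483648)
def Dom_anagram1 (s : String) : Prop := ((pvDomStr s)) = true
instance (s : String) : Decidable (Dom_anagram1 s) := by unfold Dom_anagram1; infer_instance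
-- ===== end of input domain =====

-- B replaces A's two frequency maps and surplus-comparison loop by one counter for the
-- first half plus a greedy matching pass over the second half, returning n//2 - matches
-- (objective: alternative decomposition, same O(n) cost).

-- ===== PORT A =====
def anagram1 (s : String) : Int :=
  let l := s.toList
  let n : Int := PySem.List.len l
  if PySem.Int.mod n 2 = 0 then
    let s1 := PySem.List.slice l none (some (PySem.Int.floordiv n 2))
    let s2 := PySem.List.slice l (some (PySem.Int.floordiv n 2)) none
    let hm := (PySem.List.pyRange 0 (PySem.List.len s1)).foldl
      (fun (hm : PySem.Dict Char Int × PySem.Dict Char Int) i =>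
        (hm.1.insert (PySem.List.pyGetD s1 i ' ') (hm.1.getD (PySem.List.pyGetD s1 i ' ') 0 + 1),
         hm.2.insert (PySem.List.pyGetD s2 i ' ') (hm.2.getD (PySem.List.pyGetD s2 i ' ') 0 + 1)))
      (PySem.Dict.empty, PySem.Dict.empty)
    hm.1.keys.foldl
      (fun res key =>
        if hm.2.contains key then
          if hm.1.getD key 0 > hm.2.getD key 0 then res + (hm.1.getD key 0 - hm.2.getD key 0)
          else res
        else res + hm.1.getD key 0) 0
  else -1

-- ===== PORT B =====
def anagram1_alt (s : String) : Int :=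
  let l := s.toList
  let n : Int := PySem.List.len l
  if PySem.Int.mod n 2 ≠ 0 then -1
  else
    let half := PySem.Int.floordiv n 2
    let c1 := (PySem.List.slice l none (some half)).foldl
      (fun (d : PySem.Dict Char Int) ch => d.insert ch (d.getD ch 0 + 1)) PySem.Dict.empty
    let r := (PySem.List.slice l (some half) none).foldl
      (fun (st : PySem.Dict Char Int × Int) ch =>
        if st.1.getD ch 0 > 0 then (st.1.insert ch (st.1.getD ch 0 - 1), st.2 + 1) else st)
      (c1, 0)
    half - r.2

-- ===== PRECONDITION & SPEC =====
def Spec_anagram1 (s : String) (out : Int) : Prop := out = anagram1_alt s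
instance (s : String) (out : Int) : Decidable (Spec_anagram1 s out) := by unfold Spec_anagram1; infer_instance

-- ===== CLAIM (what is proved, stated in full; the proofs are below) =====
def Claim_equal_anagram1 : Prop := ∀ (s : String), Dom_anagram1 s → Spec_anagram1 s (anagram1 s)

-- ===== LEMMAS AND PROOFS =====

-- B's greedy matching pass: the matched tally it produces is Σ_k min(d k, count k l2)
-- over the keys of the counter d (all of whose values are nonnegative).
lemma matchFold (l2 : List Char) : ∀ (d : PySem.Dict Char Int) (m : Int),
    d.keys.Nodup → (∀ k ∈ d.keys, 0 ≤ d.getD k 0) →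
    (l2.foldl (fun (st : PySem.Dict Char Int × Int) ch =>
        if st.1.getD ch 0 > 0 then (st.1.insert ch (st.1.getD ch 0 - 1), st.2 + 1) else st) (d, m)).2
    = m + (d.keys.map (fun k => min (d.getD k 0) ((l2.count k : Nat) : Int))).sum := by
  induction l2 with
  | nil =>
    intro d m hnd hpos
    simp only [List.foldl_nil, List.count_nil, Nat.cast_zero]
    have h0 : (d.keys.map (fun k => min (d.getD k 0) (0:Int))).sum = 0 := by
      apply List.sum_eq_zero
      intro x hx
      obtain ⟨k, hk, rfl⟩ := List.mem_map.mp hx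
      have := hpos k hk
      omega
    omega
  | cons ch t ih =>
    intro d m hnd hpos
    simp only [List.foldl_cons]
    by_cases hc : d.getD ch 0 > 0
    · rw [if_pos hc]
      have hmem : ch ∈ d.keys := by
        by_contra hno
        have : d.contains ch = false := by
          cases h : d.contains ch
          · rfl
          · exact absurd ((PySem.Dict.contains_iff_mem_keys d ch).mp h) hno
        rw [PySem.Dict.getD_of_not_contains d 0 this] at hc
        omega
      have hcont : d.contains ch = true := (PySem.Dict.contains_iff_mem_keys d ch).mpr hmem
      have hkeys : (d.insert ch (d.getD ch 0 - 1)).keys = d.keys :=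
        PySem.Dict.keys_insert_of_contains d _ hcont
      rw [ih _ _ (by rw [hkeys]; exact hnd)
            (by intro k hk; rw [hkeys] at hk
                rw [PySem.Dict.getD_insert]
                split_ifs with he
                · omega
                · exact hpos k hk)]
      rw [hkeys]
      have hsplit : (d.keys.map (fun k => min (d.getD k 0) (((ch :: t).count k : Nat) : Int))).sum
          = (d.keys.map (fun k => (if (k == ch) = true then (1:Int) else 0)
              + min ((d.insert ch (d.getD ch 0 - 1)).getD k 0) ((t.count k : Nat) : Int))).sum := by
        apply congrArg
        apply List.map_congr_left
        intro k hk
        rw [PySem.Dict.getD_insert]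
        by_cases he : k = ch
        · subst he
          simp only [List.count_cons_self, beq_self_eq_true]
          push_cast
          omega
        · have : (k == ch) = false := by simp [he]
          rw [if_neg he, List.count_cons_of_ne (Ne.symm he)]
          simp [this]
      rw [hsplit, PySem.List.sum_map_add_int]
      have hcount : (d.keys.map (fun k => if (k == ch) = true then (1:Int) else 0)).sum
          = ((d.keys.count ch : Nat) : Int) := by
        rw [PySem.List.sum_map_ite_one_zero (fun k => k == ch) d.keys]
        simp [List.count]
      rw [hcount, List.count_eq_one_of_mem hnd hmem]
      push_cast
      ring
    · rw [if_neg hc]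
      rw [ih d m hnd hpos]
      have : (d.keys.map (fun k => min (d.getD k 0) (((ch :: t).count k : Nat) : Int))).sum
          = (d.keys.map (fun k => min (d.getD k 0) ((t.count k : Nat) : Int))).sum := by
        apply congrArg
        apply List.map_congr_left
        intro k hk
        by_cases he : k = ch
        · subst he
          have h0 : d.getD k 0 = 0 := le_antisymm (by omega) (hpos k hk)
          rw [h0]
          simp only [List.count_cons_self]
          omega
        · rw [List.count_cons_of_ne (Ne.symm he)]
      rw [this]

-- A's comparison loop over the first counter's keys is Σ_k max(count1 k − count2 k, 0).
lemma resFold (l1 l2 : List Char) :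
    (PySem.Set.ofList l1).foldl
      (fun res key =>
        if (PySem.Dict.counter l2).contains key then
          if (PySem.Dict.counter l1).getD key 0 > (PySem.Dict.counter l2).getD key 0 then
            res + ((PySem.Dict.counter l1).getD key 0 - (PySem.Dict.counter l2).getD key 0)
          else res
        else res + (PySem.Dict.counter l1).getD key 0) 0
    = ((PySem.Set.ofList l1).map
        (fun k => max (((l1.count k : Nat) : Int) - ((l2.count k : Nat) : Int)) 0)).sum := by
  rw [PySem.List.foldl_congr_mem (PySem.Set.ofList l1) _
      (fun res k => res + max (((l1.count k : Nat) : Int) - ((l2.count k : Nat) : Int)) 0) 0 ?_]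
  · rw [PySem.List.foldl_add]
    omega
  · intro acc k hk
    have hk1 : k ∈ l1 := (PySem.Set.mem_ofList l1 k).mp hk
    rw [PySem.Dict.contains_counter, PySem.Dict.getD_counter, PySem.Dict.getD_counter]
    by_cases hmem : k ∈ l2
    · have : l2.contains k = true := by simpa using hmem
      rw [this]
      simp only [if_true]
      split_ifs with hgt
      · omega
      · omega
    · have : l2.contains k = false := by simpa using hmem
      rw [this]
      simp only [Bool.false_eq_true, if_false]
      have hz : l2.count k = 0 := List.count_eq_zero_of_not_mem hmem
      have hp : 0 < l1.count k := List.count_pos_iff.mpr hk1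
      rw [hz]
      push_cast
      omega

-- Σ_k count1 k over the distinct keys of l1 is the length of l1.
lemma sum_count_ofList (l1 : List Char) :
    ((PySem.Set.ofList l1).map (fun k => ((l1.count k : Nat) : Int))).sum = (l1.length : Int) := by
  have hperm : (PySem.Set.ofList l1).Perm l1.dedup := by
    rw [List.perm_ext_iff_of_nodup (PySem.Set.nodup_ofList l1) l1.nodup_dedup]
    intro a
    rw [PySem.Set.mem_ofList, List.mem_dedup]
  have := (hperm.map (fun k => ((l1.count k : Nat) : Int))).sum_eq
  rw [this]
  have : (l1.dedup.map (fun k => ((l1.count k : Nat) : Int))).sum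
      = (((l1.dedup.map (fun k => l1.count k)).sum : Nat) : Int) := by
    rw [Nat.cast_list_sum, List.map_map]
    rfl
  rw [this, List.sum_map_count_dedup_eq_length]

-- ===== VERDICT (by name: the statement is the Claim_ definition above) =====
-- pointwise: max(a-b,0) + min(a,b) = a, summed over the distinct keys
lemma sum_max_add_min (l1 l2 : List Char) :
    ((PySem.Set.ofList l1).map
        (fun k => max (((l1.count k : Nat) : Int) - ((l2.count k : Nat) : Int)) 0)).sum
      + ((PySem.Set.ofList l1).map
        (fun k => min ((l1.count k : Nat) : Int) ((l2.count k : Nat) : Int))).sum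
    = (l1.length : Int) := by
  rw [← PySem.List.sum_map_add_int]
  rw [List.map_congr_left (fun k _ => by omega :
        ∀ k ∈ PySem.Set.ofList l1,
          max (((l1.count k : Nat) : Int) - ((l2.count k : Nat) : Int)) 0
            + min ((l1.count k : Nat) : Int) ((l2.count k : Nat) : Int)
          = ((l1.count k : Nat) : Int))]
  exact sum_count_ofList l1

-- ===== VERDICT (by name: the statement is the Claim_ definition above) =====
theorem anagram1_spec : Claim_equal_anagram1 := by
  intro s _
  show anagram1 s = anagram1_alt s
  have hlen : ∀ (xs : List Char), PySem.List.len xs = (xs.length : Int) := by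
    intro xs; simp [PySem.List.len]
  have hmod : PySem.Int.mod (PySem.List.len s.toList) 2 = ((s.toList.length % 2 : Nat) : Int) := by
    rw [hlen]; exact_mod_cast PySem.Int.mod_natCast s.toList.length 2
  by_cases hpar : s.toList.length % 2 = 0
  · -- even length
    have hfd : PySem.Int.floordiv (PySem.List.len s.toList) 2 = ((s.toList.length / 2 : Nat) : Int) := by
      rw [hlen]; exact_mod_cast PySem.Int.floordiv_natCast s.toList.length 2
    have hcond : PySem.Int.mod (PySem.List.len s.toList) 2 = 0 := by
      rw [hmod, hpar]; simp
    set l : List Char := s.toList with hl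
    set h : Nat := l.length / 2 with hh
    set l1 : List Char := l.take h with hl1
    set l2 : List Char := l.drop h with hl2
    have hlen1 : l1.length = h := by
      rw [hl1, List.length_take]; omega
    have hlen2 : l2.length = h := by
      rw [hl2, List.length_drop]; omega
    have hA : anagram1 s
        = ((PySem.Set.ofList l1).map
            (fun k => max (((l1.count k : Nat) : Int) - ((l2.count k : Nat) : Int)) 0)).sum := by
      simp only [anagram1, ← hl, hcond, if_pos, hfd, PySem.List.slice_to_natCast,
        PySem.List.slice_from_natCast, ← hl1, ← hl2]
      have hprod : (PySem.List.pyRange 0 (PySem.List.len l1)).foldl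
          (fun (hm : PySem.Dict Char Int × PySem.Dict Char Int) i =>
            (hm.1.insert (PySem.List.pyGetD l1 i ' ') (hm.1.getD (PySem.List.pyGetD l1 i ' ') 0 + 1),
             hm.2.insert (PySem.List.pyGetD l2 i ' ') (hm.2.getD (PySem.List.pyGetD l2 i ' ') 0 + 1)))
          (PySem.Dict.empty, PySem.Dict.empty)
          = (PySem.Dict.counter l1, PySem.Dict.counter l2) := by
        refine Eq.trans (PySem.List.foldl_prod_mk
          (f := fun (d : PySem.Dict Char Int) (i : Int) => d.insert (PySem.List.pyGetD l1 i ' ') (d.getD (PySem.List.pyGetD l1 i ' ') 0 + 1))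
          (g := fun (d : PySem.Dict Char Int) (i : Int) => d.insert (PySem.List.pyGetD l2 i ' ') (d.getD (PySem.List.pyGetD l2 i ' ') 0 + 1))
          (PySem.List.pyRange 0 (PySem.List.len l1)) PySem.Dict.empty PySem.Dict.empty) ?_
        congr 1
        · refine Eq.trans (PySem.List.foldl_pyRange_pyGetD l1 ' '
            (fun (d : PySem.Dict Char Int) (c : Char) => d.insert c (d.getD c 0 + 1)) PySem.Dict.empty (le_refl 0)) ?_
          simp [PySem.Dict.foldl_insert_getD_add_one_eq_counter]
        · have : PySem.List.len l1 = PySem.List.len l2 := by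
            rw [hlen, hlen, hlen1, hlen2]
          rw [this]
          refine Eq.trans (PySem.List.foldl_pyRange_pyGetD l2 ' '
            (fun (d : PySem.Dict Char Int) (c : Char) => d.insert c (d.getD c 0 + 1)) PySem.Dict.empty (le_refl 0)) ?_
          simp [PySem.Dict.foldl_insert_getD_add_one_eq_counter]
      rw [hprod]
      rw [PySem.Dict.keys_counter]
      exact resFold l1 l2
    have hB : anagram1_alt s
        = ((h : Nat) : Int) - ((PySem.Set.ofList l1).map
            (fun k => min ((l1.count k : Nat) : Int) ((l2.count k : Nat) : Int))).sum := by
      have hcond' : ¬ (PySem.Int.mod (PySem.List.len s.toList) 2 ≠ 0) := by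
        rw [hcond]; simp
      simp only [anagram1_alt, ← hl, ite_not, hcond, if_pos, hfd,
        PySem.List.slice_to_natCast, PySem.List.slice_from_natCast, ← hl1, ← hl2]
      rw [PySem.Dict.foldl_insert_getD_add_one_eq_counter]
      rw [matchFold l2 (PySem.Dict.counter l1) 0 (PySem.Dict.nodup_keys_counter l1)
        (fun k _ => by rw [PySem.Dict.getD_counter]; exact Int.natCast_nonneg _)]
      rw [PySem.Dict.keys_counter]
      rw [List.map_congr_left (fun k _ => by rw [PySem.Dict.getD_counter] :
        ∀ k ∈ PySem.Set.ofList l1,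
          min ((PySem.Dict.counter l1).getD k 0) ((l2.count k : Nat) : Int)
          = min ((l1.count k : Nat) : Int) ((l2.count k : Nat) : Int))]
      ring
    rw [hA, hB]
    have hkey := sum_max_add_min l1 l2
    rw [hlen1] at hkey
    omega
  · -- odd length: both return -1
    have h1 : ¬ (PySem.Int.mod (PySem.List.len s.toList) 2 = 0) := by
      rw [hmod]
      exact_mod_cast hpar
    simp only [anagram1, anagram1_alt]
    rw [if_neg h1, if_pos h1]
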